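-- pv_equiv track=rewrite | github.com/michaelgrohs/deviation_desirability_assessment | process_atoms/mine/declare/regexchecker.py | _map_activities_to_letters
-- ===== SOURCE A (Python) =====
-- import string
--
-- def _map_activities_to_letters(activities):
--     # List of single letters A-Z
--     letters = list(string.ascii_uppercase) + list(string.ascii_lowercase[2:])
--
--     # If there are more than 50 activities get all possible combinations of 4 letters
--     if len(activities) > len(letters):
--         letters = [
--             f"{letters[idx1]}a{letters[idx2]}a{letters[idx3]}a{letters[idx4]}"
--             for idx1 in range(len(letters))
--             for idx2 in range(len(letters))
--             for idx3 in range(len(letters))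
--             for idx4 in range(len(letters))
--         ]
--
--     # Create a mapping dictionary
--     activity_to_letter = {
--         activity: letters[i] for i, activity in enumerate(activities)
--     }
--
--     return activity_to_letter
-- ===== SOURCE B (Python) =====
-- import string
--
-- def _map_activities_to_letters(activities):
--     base = list(string.ascii_uppercase) + list(string.ascii_lowercase[2:])
--     if len(activities) <= len(base):
--         def code(i):
--             return base[i]
--     else:
--         def code(i):
--             d1, r = divmod(i, len(base) ** 3)
--             d2, r = divmod(r, len(base) ** 2)
--             d3, d4 = divmod(r, len(base))
--             return f"{base[d1]}a{base[d2]}a{base[d3]}a{base[d4]}"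
--     return {activity: code(i) for i, activity in enumerate(activities)}
-- ===== Notes on version B (the rewrite author's own statement) =====
-- stated objective: faster
-- what changed: Instead of materialising all 50^4 four-letter codes and indexing into that list, B computes the code for each index directly by base-50 decomposition (divmod), generating only len(activities) codes.
import Mathlib
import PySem

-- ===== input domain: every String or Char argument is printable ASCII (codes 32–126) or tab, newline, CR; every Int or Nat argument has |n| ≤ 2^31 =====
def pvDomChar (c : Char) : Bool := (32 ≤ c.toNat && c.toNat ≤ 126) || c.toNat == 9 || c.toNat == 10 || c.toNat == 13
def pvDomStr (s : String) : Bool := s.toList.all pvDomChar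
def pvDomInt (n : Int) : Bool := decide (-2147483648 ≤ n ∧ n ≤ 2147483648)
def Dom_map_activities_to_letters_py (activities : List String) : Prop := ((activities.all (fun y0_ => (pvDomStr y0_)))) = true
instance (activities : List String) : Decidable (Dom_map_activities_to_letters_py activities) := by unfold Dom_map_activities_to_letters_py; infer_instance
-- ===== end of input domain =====

-- B replaces A's materialisation of all 50^4 combination codes by a direct base-50
-- decomposition of each index; only the return value is claimed (neither mutates its input).

-- ===== PORT A =====
-- letters = list(string.ascii_uppercase) + list(string.ascii_lowercase[2:])
def pvLettersBase : List String :=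
  "ABCDEFGHIJKLMNOPQRSTUVWXYZ".toList.map (fun c => String.ofList [c]) ++
  (PySem.List.slice "abcdefghijklmnopqrstuvwxyz".toList (some 2) none).map (fun c => String.ofList [c])

-- the quadruple comprehension A builds when len(activities) > 50
def pvComboLetters : List String :=
  (List.range pvLettersBase.length).flatMap (fun (i1 : Nat) =>
    (List.range pvLettersBase.length).flatMap (fun (i2 : Nat) =>
      (List.range pvLettersBase.length).flatMap (fun (i3 : Nat) =>
        (List.range pvLettersBase.length).map (fun (i4 : Nat) =>
          PySem.List.pyGetD pvLettersBase (i1 : Int) "" ++ "a" ++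
          PySem.List.pyGetD pvLettersBase (i2 : Int) "" ++ "a" ++
          PySem.List.pyGetD pvLettersBase (i3 : Int) "" ++ "a" ++
          PySem.List.pyGetD pvLettersBase (i4 : Int) ""))))

-- pyGetD's default "" is never used inside Pre_ (every index is in range there)
def map_activities_to_letters_py (activities : List String) : List (String × String) :=
  let letters := if activities.length > pvLettersBase.length then pvComboLetters else pvLettersBase
  ((PySem.List.enumerate activities 0).foldl
    (fun d p => d.insert p.2 (PySem.List.pyGetD letters p.1 "")) PySem.Dict.empty).items

-- ===== PORT B =====
-- code(i) from Source B: base[i] directly, or base-50 decomposition of i via divmod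
def pvCode (n : Nat) (i : Int) : String :=
  if n ≤ pvLettersBase.length then PySem.List.pyGetD pvLettersBase i ""
  else
    let L : Int := (pvLettersBase.length : Int)
    let d1 := PySem.Int.floordiv i (L ^ 3)
    let r1 := PySem.Int.mod i (L ^ 3)
    let d2 := PySem.Int.floordiv r1 (L ^ 2)
    let r2 := PySem.Int.mod r1 (L ^ 2)
    let d3 := PySem.Int.floordiv r2 L
    let d4 := PySem.Int.mod r2 L
    PySem.List.pyGetD pvLettersBase d1 "" ++ "a" ++
    PySem.List.pyGetD pvLettersBase d2 "" ++ "a" ++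
    PySem.List.pyGetD pvLettersBase d3 "" ++ "a" ++
    PySem.List.pyGetD pvLettersBase d4 ""

def map_activities_to_letters_py_alt (activities : List String) : List (String × String) :=
  ((PySem.List.enumerate activities 0).foldl
    (fun d p => d.insert p.2 (pvCode activities.length p.1)) PySem.Dict.empty).items

-- ===== PRECONDITION & SPEC =====
-- Pre_ excludes only the inputs on which A raises IndexError: more than 50^4 activities.
def Pre_map_activities_to_letters_py (activities : List String) : Prop :=
  activities.length ≤ 6250000

instance (activities : List String) : Decidable (Pre_map_activities_to_letters_py activities) := by
  unfold Pre_map_activities_to_letters_py; infer_instance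

def pvWitness_map_activities_to_letters_py : List String := ["register", "approve", "ship"]

def Spec_map_activities_to_letters_py (activities : List String) (out : List (String × String)) : Prop := out = map_activities_to_letters_py_alt activities
instance (activities : List String) (out : List (String × String)) : Decidable (Spec_map_activities_to_letters_py activities out) := by unfold Spec_map_activities_to_letters_py; infer_instance

-- ===== CLAIM (what is proved, stated in full; the proofs are below) =====
def Claim_equal_map_activities_to_letters_py : Prop := ∀ (activities : List String), Dom_map_activities_to_letters_py activities → Pre_map_activities_to_letters_py activities → Spec_map_activities_to_letters_py activities (map_activities_to_letters_py activities)

-- ===== LEMMAS AND PROOFS =====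

theorem pvLettersBase_len : pvLettersBase.length = 50 := by decide

theorem pv_flatLen {α : Type} (k m : Nat) (f : Nat → List α) (hm : ∀ x, (f x).length = m) :
    ((List.range k).flatMap f).length = k * m := by
  induction k with
  | zero => simp
  | succ k ih =>
    rw [List.range_succ, List.flatMap_append, List.length_append, ih]
    simp [hm]; ring

theorem pv_flatGet {α : Type} (k m : Nat) (f : Nat → List α) (hm : ∀ x, (f x).length = m)
    (i : Nat) (hi : i < k * m) :
    ((List.range k).flatMap f)[i]? = (f (i / m))[i % m]? := by
  induction k with
  | zero => simp at hi
  | succ k ih =>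
    have hkm : (k + 1) * m = k * m + m := by ring
    rw [List.range_succ, List.flatMap_append]
    by_cases h : i < k * m
    · rw [List.getElem?_append_left (by rw [pv_flatLen k m f hm]; exact h)]
      exact ih h
    · have hsub : i - k * m < m := by omega
      have hdiv : i / m = k := by
        conv_lhs => rw [show i = (i - k * m) + k * m by omega]
        rw [Nat.add_mul_div_right _ _ (by omega : 0 < m), Nat.div_eq_of_lt hsub]
        omega
      have hmod : i % m = i - k * m := by
        conv_lhs => rw [show i = (i - k * m) + k * m by omega]
        rw [Nat.add_mul_mod_self_right]
        exact Nat.mod_eq_of_lt hsub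
      rw [List.getElem?_append_right (by rw [pv_flatLen k m f hm]; omega)]
      rw [pv_flatLen k m f hm, hdiv, hmod]
      simp

theorem pvCombo_get (j : Nat) (hj : j < 6250000) :
    pvComboLetters[j]? = some
      (PySem.List.pyGetD pvLettersBase ((j / 125000 : Nat) : Int) "" ++ "a" ++
       PySem.List.pyGetD pvLettersBase ((j % 125000 / 2500 : Nat) : Int) "" ++ "a" ++
       PySem.List.pyGetD pvLettersBase ((j % 125000 % 2500 / 50 : Nat) : Int) "" ++ "a" ++
       PySem.List.pyGetD pvLettersBase ((j % 125000 % 2500 % 50 : Nat) : Int) "") := by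
  have h50 := pvLettersBase_len
  have hlen1 : ∀ (g : Nat → String),
      ((List.range pvLettersBase.length).map g).length = 50 := by
    intro g; simp [h50]
  have hlen2 : ∀ (g : Nat → Nat → String),
      ((List.range pvLettersBase.length).flatMap
        (fun (i3 : Nat) => (List.range pvLettersBase.length).map (g i3))).length = 2500 := by
    intro g
    rw [pv_flatLen _ 50 _ (fun z => hlen1 (g z)), h50]
  have hlen3 : ∀ (g : Nat → Nat → Nat → String),
      ((List.range pvLettersBase.length).flatMap (fun (i2 : Nat) =>
        (List.range pvLettersBase.length).flatMap
          (fun (i3 : Nat) => (List.range pvLettersBase.length).map (g i2 i3)))).length = 125000 := by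
    intro g
    rw [pv_flatLen _ 2500 _ (fun z => hlen2 (g z)), h50]
  unfold pvComboLetters
  rw [pv_flatGet _ 125000 _ (fun x => hlen3 _) j (by rw [h50]; omega)]
  rw [pv_flatGet _ 2500 _ (fun x => hlen2 _) (j % 125000) (by rw [h50]; omega)]
  rw [pv_flatGet _ 50 _ (fun x => hlen1 _) (j % 125000 % 2500) (by rw [h50]; omega)]
  rw [List.getElem?_map]
  have hr : (List.range pvLettersBase.length)[j % 125000 % 2500 % 50]? =
      some (j % 125000 % 2500 % 50) := List.getElem?_range (by omega)
  rw [hr]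
  rfl

theorem pvCode_eq_comboGet (n j : Nat) (hn : 50 < n) (hj : j < 6250000) :
    PySem.List.pyGetD pvComboLetters ((j : Nat) : Int) "" = pvCode n (j : Nat) := by
  have h50 := pvLettersBase_len
  unfold pvCode
  rw [if_neg (by omega)]
  simp only [h50]
  rw [show ((50 : Nat) : Int) ^ 3 = ((125000 : Nat) : Int) from by norm_num,
      show ((50 : Nat) : Int) ^ 2 = ((2500 : Nat) : Int) from by norm_num]
  simp only [PySem.Int.floordiv_natCast, PySem.Int.mod_natCast, PySem.List.pyGetD_natCast]
  rw [List.getD_eq_getElem?_getD, pvCombo_get j hj]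
  simp only [Option.getD_some, PySem.List.pyGetD_natCast]

theorem pv_code_agree (activities : List String) (hpre : activities.length ≤ 6250000)
    (k : Nat) (hk : k < activities.length) :
    PySem.List.pyGetD
        (if activities.length > pvLettersBase.length then pvComboLetters else pvLettersBase)
        ((k : Nat) : Int) "" = pvCode activities.length (k : Nat) := by
  have h50 := pvLettersBase_len
  by_cases h : activities.length > pvLettersBase.length
  · rw [if_pos h]
    exact pvCode_eq_comboGet activities.length k (by omega) (by omega)
  · rw [if_neg h]
    unfold pvCode
    rw [if_pos (by omega)]

-- ===== VERDICT (by name: the statement is the Claim_ definition above) =====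
theorem map_activities_to_letters_py_spec : Claim_equal_map_activities_to_letters_py := by
  intro activities _ hpre
  unfold Spec_map_activities_to_letters_py
  unfold map_activities_to_letters_py map_activities_to_letters_py_alt
  have hfold := PySem.List.foldl_congr_mem
    (l := PySem.List.enumerate activities 0)
    (init := (PySem.Dict.empty : PySem.Dict String String))
    (f := fun d p => d.insert p.2 (PySem.List.pyGetD
      (if activities.length > pvLettersBase.length then pvComboLetters else pvLettersBase) p.1 ""))
    (g := fun d p => d.insert p.2 (pvCode activities.length p.1))
    (by
      intro acc p hp
      rcases (PySem.List.mem_enumerate_iff _ _ _).1 hp with ⟨k, hk, rfl⟩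
      simp only []
      rw [show ((0 : Int) + k) = ((k : Nat) : Int) by omega]
      rw [pv_code_agree activities hpre k hk])
  simp only [] at hfold ⊢
  rw [hfold]
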